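-- pv_equiv track=rewrite | github.com/nereafernandeez/QKD_attacks | Simulacion_SARG04_THA_ENGLISH.py | key_Eve
-- ===== SOURCE A (Python) =====
-- def key_Eve(bases_Bob, positions):
--     n = len(bases_Bob)
--     key = []
--     final_key = []
--
--     for i in range(n):
--         # If Bob chose Z, Eve records 1; if X, Eve records 0
--         if(bases_Bob[i]) == "Z":
--             key.append(1)
--         else:
--             key.append(0)
--
--     # Eve knows which positions to keep from the public channel announcement
--     for i in positions:
--         final_key.append(key[i])
--
--     return final_key
-- ===== SOURCE B (Python) =====
-- def key_Eve(bases_Bob, positions):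
--     # Single pass over positions: map each kept index straight to its bit,
--     # without materialising the full-length key table.
--     return [1 if bases_Bob[i] == "Z" else 0 for i in positions]
-- ===== Notes on version B (the rewrite author's own statement) =====
-- stated objective: simpler
-- what changed: Drops the intermediate full-length key table and the two-loop 'build then index' decomposition; B maps each kept position directly to its bit in one comprehension over positions.
import Mathlib
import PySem

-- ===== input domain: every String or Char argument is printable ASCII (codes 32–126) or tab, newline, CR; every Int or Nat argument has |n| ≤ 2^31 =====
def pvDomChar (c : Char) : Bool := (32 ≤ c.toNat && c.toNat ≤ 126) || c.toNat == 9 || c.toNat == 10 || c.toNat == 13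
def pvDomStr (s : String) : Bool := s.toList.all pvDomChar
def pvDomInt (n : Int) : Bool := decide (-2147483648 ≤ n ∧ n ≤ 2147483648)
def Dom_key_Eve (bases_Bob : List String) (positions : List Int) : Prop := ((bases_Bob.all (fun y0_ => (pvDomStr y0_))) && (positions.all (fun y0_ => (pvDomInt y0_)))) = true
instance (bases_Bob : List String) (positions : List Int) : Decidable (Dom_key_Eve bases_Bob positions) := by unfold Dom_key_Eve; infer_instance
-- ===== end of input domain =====

-- ===== PORT A =====
-- B changes the decomposition only: one pass over positions instead of a full key table; return values agree on Pre_.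
def key_Eve (bases_Bob : List String) (positions : List Int) : List Int :=
  let n := PySem.List.len bases_Bob
  let key : List Int := (PySem.List.pyRange 0 n).foldl
    (fun acc i => if PySem.List.pyGetD bases_Bob i "" = "Z" then acc ++ [(1 : Int)] else acc ++ [(0 : Int)]) []
  positions.foldl (fun acc i => acc ++ [PySem.List.pyGetD key i 0]) []

-- ===== PORT B =====
def key_Eve_alt (bases_Bob : List String) (positions : List Int) : List Int :=
  positions.map (fun i => if PySem.List.pyGetD bases_Bob i "" = "Z" then (1 : Int) else 0)

-- ===== PRECONDITION & SPEC =====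
-- Pre_ excludes exactly the inputs where A raises IndexError: some position out of range for bases_Bob.
def Pre_key_Eve (bases_Bob : List String) (positions : List Int) : Prop :=
  ∀ i ∈ positions, PySem.Raise.InRange bases_Bob.length i
instance (bases_Bob : List String) (positions : List Int) : Decidable (Pre_key_Eve bases_Bob positions) := by unfold Pre_key_Eve; infer_instance
def pvWitness_key_Eve : List String × List Int := (["Z", "X"], [0, 1, -1])

def Spec_key_Eve (bases_Bob : List String) (positions : List Int) (out : List Int) : Prop := out = key_Eve_alt bases_Bob positions
instance (bases_Bob : List String) (positions : List Int) (out : List Int) : Decidable (Spec_key_Eve bases_Bob positions out) := by unfold Spec_key_Eve; infer_instance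

-- ===== CLAIM (what is proved, stated in full; the proofs are below) =====
def Claim_equal_key_Eve : Prop := ∀ (bases_Bob : List String) (positions : List Int), Dom_key_Eve bases_Bob positions → Pre_key_Eve bases_Bob positions → Spec_key_Eve bases_Bob positions (key_Eve bases_Bob positions)

-- ===== LEMMAS AND PROOFS =====
-- A's first loop builds exactly the bit-map of bases_Bob.
theorem key_Eve_key_eq (bases_Bob : List String) :
    (PySem.List.pyRange 0 (PySem.List.len bases_Bob)).foldl
      (fun acc i => if PySem.List.pyGetD bases_Bob i "" = "Z" then acc ++ [(1 : Int)] else acc ++ [(0 : Int)]) []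
    = bases_Bob.map (fun b => if b = "Z" then (1 : Int) else 0) := by
  have hbody : (fun (acc : List Int) (i : Int) =>
      if PySem.List.pyGetD bases_Bob i "" = "Z" then acc ++ [(1 : Int)] else acc ++ [(0 : Int)])
      = fun acc i => acc ++ [if PySem.List.pyGetD bases_Bob i "" = "Z" then (1 : Int) else 0] := by
    funext acc i; split_ifs <;> rfl
  rw [hbody, PySem.List.foldl_append_singleton_eq_map, List.nil_append]
  have : (fun i => if PySem.List.pyGetD bases_Bob i "" = "Z" then (1 : Int) else 0)
      = (fun b => if b = "Z" then (1 : Int) else 0) ∘ (fun i => PySem.List.pyGetD bases_Bob i "") := rfl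
  rw [this, ← List.map_map, PySem.List.map_pyGetD_pyRange_zero]

theorem key_Eve_eq (bases_Bob : List String) (positions : List Int) :
    key_Eve bases_Bob positions = key_Eve_alt bases_Bob positions := by
  unfold key_Eve key_Eve_alt
  simp only [key_Eve_key_eq, PySem.List.foldl_append_singleton_eq_map, List.nil_append]
  refine List.map_congr_left (fun i _ => ?_)
  simpa using PySem.List.pyGetD_map (fun b => if b = "Z" then (1 : Int) else 0) bases_Bob i ""

-- ===== VERDICT (by name: the statement is the Claim_ definition above) =====
theorem key_Eve_spec : Claim_equal_key_Eve := by
  intro bases_Bob positions _ _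
  exact key_Eve_eq bases_Bob positions
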